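-- pv_equiv track=rewrite | github.com/Tuna-Onguner/Bilkent | CS 115/Labs/Lab #6/Lab06_Q1.py | values_before
-- ===== SOURCE A (Python) =====
-- def values_before(arr: list, search_value: int) -> list:
--     counts: list = []
--
--     for col in range(len(arr[0])):
--         count: int = 0
--         found: bool = False
--
--         for row in range(len(arr)):
--             if arr[row][col] == search_value:
--                 found = True
--                 break
--
--             if not found:
--                 count += 1
--
--         if not found:
--             count = -1
--
--         counts.append(count)
--
--     return counts
-- ===== SOURCE B (Python) =====
-- def values_before(arr: list, search_value: int) -> list:
--     n = len(arr[0])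
--     counts = [0] * n
--     found = [False] * n
--     for row in arr:
--         for col in range(n):
--             if not found[col]:
--                 if row[col] == search_value:
--                     found[col] = True
--                 else:
--                     counts[col] += 1
--     return [c if f else -1 for c, f in zip(counts, found)]
-- ===== Notes on version B (the rewrite author's own statement) =====
-- stated objective: alternative
-- what changed: B replaces A's per-column rescans of the whole array by a single row-major pass that maintains parallel count/found state for all columns at once, finishing with a map that turns never-found columns into -1.
-- outside the precondition, e.g. on values_before([[1, 1], [1]], 1): A returns [0, 0], B returns [0, 0]
import Mathlib
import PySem

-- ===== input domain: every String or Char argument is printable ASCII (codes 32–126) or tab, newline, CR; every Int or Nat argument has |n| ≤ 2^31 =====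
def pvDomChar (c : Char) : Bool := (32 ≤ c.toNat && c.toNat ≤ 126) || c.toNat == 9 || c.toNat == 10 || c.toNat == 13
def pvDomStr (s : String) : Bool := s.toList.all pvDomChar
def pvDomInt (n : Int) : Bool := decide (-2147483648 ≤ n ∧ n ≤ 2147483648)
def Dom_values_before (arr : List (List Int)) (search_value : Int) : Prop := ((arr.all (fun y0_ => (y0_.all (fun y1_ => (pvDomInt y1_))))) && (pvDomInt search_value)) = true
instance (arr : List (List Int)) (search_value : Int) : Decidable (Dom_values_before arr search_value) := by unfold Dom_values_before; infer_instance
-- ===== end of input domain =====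

-- B is an alternative single-pass (row-major) re-implementation of A's per-column rescans; equal return value on Pre_.

-- ===== PORT A =====
-- inner 'for row in range(len(arr))' loop of A for one column: count rows until the first
-- match (break), -1 if the loop ends without a match (arr[row][col] → pyGetD, in range on Pre_)
def vbScan (rows : List (List Int)) (search_value col count : Int) : Int :=
  match rows with
  | [] => -1
  | r :: rs =>
    if PySem.List.pyGetD r col 0 = search_value then count
    else vbScan rs search_value col (count + 1)

def values_before (arr : List (List Int)) (search_value : Int) : List Int :=
  (PySem.List.pyRange 0 ((arr.headD []).length : Int) 1).map
    (fun col => vbScan arr search_value col 0)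

-- ===== PORT B =====
-- inner 'for col in range(n)' loop of B over one row: updates the parallel (count, found) state
def vbRow (row : List Int) (search_value : Int) : List (Int × Bool) → Int → List (Int × Bool)
  | [], _ => []
  | cf :: rest, col =>
    (if cf.2 then cf
     else if PySem.List.pyGetD row col 0 = search_value then (cf.1, true)
     else (cf.1 + 1, false)) :: vbRow row search_value rest (col + 1)

def values_before_alt (arr : List (List Int)) (search_value : Int) : List Int :=
  let st0 := List.replicate (arr.headD []).length ((0 : Int), false)
  (arr.foldl (fun st row => vbRow row search_value st 0) st0).map
    (fun cf => if cf.2 then cf.1 else -1)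

-- ===== PRECONDITION & SPEC =====
-- Pre_ requires a nonempty arr whose rows are all at least as long as the first row:
-- on empty arr both Pythons raise IndexError at arr[0], and on ragged (shorter-row) inputs
-- A raises IndexError unless the search value happens to appear above every short cell —
-- an accident of scan order — so ragged inputs are excluded as a whole.
def Pre_values_before (arr : List (List Int)) (_search_value : Int) : Prop :=
  arr ≠ [] ∧ ∀ r ∈ arr, (arr.headD []).length ≤ r.length
instance (arr : List (List Int)) (search_value : Int) : Decidable (Pre_values_before arr search_value) := by unfold Pre_values_before; infer_instance
def pvWitness_values_before : List (List Int) × Int := ([[1, 2], [3, 4]], 3)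

def Spec_values_before (arr : List (List Int)) (search_value : Int) (out : List Int) : Prop := out = values_before_alt arr search_value
instance (arr : List (List Int)) (search_value : Int) (out : List Int) : Decidable (Spec_values_before arr search_value out) := by unfold Spec_values_before; infer_instance

-- ===== CLAIM (what is proved, stated in full; the proofs are below) =====
def Claim_equal_values_before : Prop := ∀ (arr : List (List Int)) (search_value : Int), Dom_values_before arr search_value → Pre_values_before arr search_value → Spec_values_before arr search_value (values_before arr search_value)

-- ===== LEMMAS AND PROOFS =====

-- one column's transition of B's state for one row
def vbStep (search_value col : Int) (cf : Int × Bool) (row : List Int) : Int × Bool :=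
  if cf.2 then cf
  else if PySem.List.pyGetD row col 0 = search_value then (cf.1, true)
  else (cf.1 + 1, false)

theorem vbRow_length (row : List Int) (sv : Int) (st : List (Int × Bool)) (col : Int) :
    (vbRow row sv st col).length = st.length := by
  induction st generalizing col with
  | nil => rfl
  | cons cf rest ih => simp [vbRow, ih]

theorem vbRow_getElem (row : List Int) (sv : Int) (st : List (Int × Bool)) (col : Int)
    (i : Nat) (hi : i < st.length) :
    (vbRow row sv st col)[i]'(by rw [vbRow_length]; exact hi)
      = vbStep sv (col + i) (st[i]'hi) row := by
  induction st generalizing col i with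
  | nil => simp at hi
  | cons cf rest ih =>
    cases i with
    | zero => simp [vbRow, vbStep]
    | succ j =>
      have := ih (col + 1) j (by simpa using Nat.lt_of_succ_lt_succ hi)
      simp only [vbRow, List.getElem_cons_succ]
      rw [this]
      congr 1
      push_cast
      ring

theorem fold_length (rows : List (List Int)) (sv : Int) (st : List (Int × Bool)) :
    (rows.foldl (fun st row => vbRow row sv st 0) st).length = st.length := by
  induction rows generalizing st with
  | nil => rfl
  | cons r rs ih => simp [List.foldl_cons, ih, vbRow_length]

theorem fold_getElem (rows : List (List Int)) (sv : Int) (st : List (Int × Bool))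
    (i : Nat) (hi : i < st.length) :
    (rows.foldl (fun st row => vbRow row sv st 0) st)[i]'(by rw [fold_length]; exact hi)
      = rows.foldl (fun cf row => vbStep sv (i : Int) cf row) (st[i]'hi) := by
  induction rows generalizing st with
  | nil => rfl
  | cons r rs ih =>
    simp only [List.foldl_cons]
    have h1 : i < (vbRow r sv st 0).length := by rw [vbRow_length]; exact hi
    rw [ih (vbRow r sv st 0) h1, vbRow_getElem r sv st 0 i hi]
    simp

theorem vbStep_found (rows : List (List Int)) (sv col c : Int) :
    rows.foldl (fun cf row => vbStep sv col cf row) (c, true) = (c, true) := by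
  induction rows with
  | nil => rfl
  | cons r rs ih =>
    simp only [List.foldl_cons]
    rw [show vbStep sv col (c, true) r = (c, true) from by simp [vbStep], ih]

theorem fold_col_eq_scan (rows : List (List Int)) (sv col c : Int) :
    (fun cf : Int × Bool => if cf.2 then cf.1 else -1)
        (rows.foldl (fun cf row => vbStep sv col cf row) (c, false))
      = vbScan rows sv col c := by
  induction rows generalizing c with
  | nil => simp [vbScan]
  | cons r rs ih =>
    simp only [List.foldl_cons, vbScan]
    by_cases h : PySem.List.pyGetD r col 0 = sv
    · rw [show vbStep sv col (c, false) r = (c, true) from by simp [vbStep, h],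
          vbStep_found]
      simp [h]
    · rw [show vbStep sv col (c, false) r = (c + 1, false) from by simp [vbStep, h],
          if_neg h]
      exact ih (c + 1)

-- ===== VERDICT (by name: the statement is the Claim_ definition above) =====
theorem values_before_spec : Claim_equal_values_before := by
  intro arr sv _ _
  unfold Spec_values_before values_before values_before_alt
  set n := (arr.headD []).length with hn
  apply List.ext_getElem
  · simp [fold_length, PySem.List.length_pyRange_one]
  · intro i h1 h2
    have hi : i < n := by
      simpa [PySem.List.length_pyRange_one] using h1
    have hcol : (PySem.List.pyRange 0 (n : Int) 1)[i]'(by simpa [PySem.List.length_pyRange_one] using hi) = (i : Int) := by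
      simp [PySem.List.getElem_pyRange_one]
    have hst : i < (List.replicate n ((0 : Int), false)).length := by simpa using hi
    rw [List.getElem_map, List.getElem_map, hcol,
        fold_getElem arr sv (List.replicate n ((0 : Int), false)) i hst]
    have : (List.replicate n ((0 : Int), false))[i]'hst = ((0 : Int), false) := by
      simp
    rw [this]
    simpa using (fold_col_eq_scan arr sv (i : Int) 0).symm
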